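-- pv_equiv track=rewrite | github.com/andre-yer/algorithms_structures | yandex/yandex_algorithms/2/F.py | symmetric_elem
-- ===== SOURCE A (Python) =====
-- def symmetric_elem(numbers, n):
--     answer = -1
--     for i in range(n - 1):
--         if numbers[i] != numbers[n - 1]:
--             answer = i
--         else:
--             if is_symmetric(numbers[i:n]):
--                 return answer
--             else:
--                 continue
--     return answer
--
-- def is_symmetric(numbers):
--     for i in range(len(numbers)):
--         if numbers[i] != numbers[len(numbers) - 1 - i]:
--             return False
--     return True
-- ===== SOURCE B (Python) =====
-- def symmetric_elem(numbers, n):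
--     if n <= 1:
--         return -1
--     last = numbers[n - 1]
--     # phase 1: first index i in [0, n-2] whose suffix numbers[i:n] is a palindrome (else n-1)
--     bound = n - 1
--     for i in range(n - 1):
--         if numbers[i] == last and _pal(numbers, i, n - 1):
--             bound = i
--             break
--     # phase 2: last index j < bound holding a value different from numbers[n-1]
--     for j in range(bound - 1, -1, -1):
--         if numbers[j] != last:
--             return j
--     return -1
--
-- def _pal(numbers, lo, hi):
--     while lo < hi:
--         if numbers[lo] != numbers[hi]:
--             return False
--         lo += 1
--         hi -= 1
--     return True
-- ===== Notes on version B (the rewrite author's own statement) =====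
-- stated objective: alternative
-- what changed: B replaces A's single forward pass with a mutating 'answer' accumulator and full-length slice-copy palindrome checks by a two-phase decomposition: locate the first palindromic suffix with an in-place two-pointer check (no slice copies, half the comparisons, guarded by a cheap last-element test), then a backward scan for the last index before it holding a value different from the last element.
import Mathlib
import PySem

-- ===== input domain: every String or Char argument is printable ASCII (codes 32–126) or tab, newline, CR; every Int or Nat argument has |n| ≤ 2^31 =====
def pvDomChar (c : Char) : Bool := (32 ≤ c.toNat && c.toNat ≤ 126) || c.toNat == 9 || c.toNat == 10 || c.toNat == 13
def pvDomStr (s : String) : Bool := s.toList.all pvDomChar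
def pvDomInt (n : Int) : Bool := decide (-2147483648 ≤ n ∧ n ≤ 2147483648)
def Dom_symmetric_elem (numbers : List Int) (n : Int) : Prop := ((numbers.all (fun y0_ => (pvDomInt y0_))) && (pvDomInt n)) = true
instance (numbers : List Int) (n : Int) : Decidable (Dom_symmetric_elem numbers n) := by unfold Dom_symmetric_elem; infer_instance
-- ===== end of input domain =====

-- B replaces A's forward pass with accumulator + slice-based palindrome checks by a two-phase
-- decomposition (two-pointer palindrome test, then a backward scan); objective: alternative.

-- ===== PORT A =====
-- helper is_symmetric: 'for i in range(len(numbers)): if numbers[i] != numbers[len-1-i]: return False'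
def pvIsSymLoop (xs : List Int) : List Int → Bool
  | [] => true
  | i :: rest =>
    if PySem.List.pyGetD xs i 0 ≠ PySem.List.pyGetD xs ((xs.length : Int) - 1 - i) 0 then false
    else pvIsSymLoop xs rest

def pvIsSymmetric (xs : List Int) : Bool :=
  pvIsSymLoop xs (PySem.List.pyRange 0 (xs.length : Int) 1)

-- the main loop of A: 'for i in range(n-1)' with the mutable 'answer'
def pvALoop (numbers : List Int) (n : Int) : List Int → Int → Int
  | [], answer => answer
  | i :: rest, answer =>
    if PySem.List.pyGetD numbers i 0 ≠ PySem.List.pyGetD numbers (n - 1) 0 then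
      pvALoop numbers n rest i
    else if pvIsSymmetric (PySem.List.slice numbers (some i) (some n)) then answer
    else pvALoop numbers n rest answer

def symmetric_elem (numbers : List Int) (n : Int) : Int :=
  pvALoop numbers n (PySem.List.pyRange 0 (n - 1) 1) (-1)

-- ===== PORT B =====
-- _pal: two-pointer 'while lo < hi' in-place palindrome check
def pvPal (numbers : List Int) (lo hi : Int) : Bool :=
  if lo < hi then
    if PySem.List.pyGetD numbers lo 0 ≠ PySem.List.pyGetD numbers hi 0 then false
    else pvPal numbers (lo + 1) (hi - 1)
  else true
termination_by (hi - lo).toNat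
decreasing_by omega

-- phase 1: first i in range(n-1) with numbers[i] == last and _pal(numbers, i, n-1); default n-1
def pvFindBound (numbers : List Int) (n last : Int) : List Int → Int
  | [] => n - 1
  | i :: rest =>
    if PySem.List.pyGetD numbers i 0 == last && pvPal numbers i (n - 1) then i
    else pvFindBound numbers n last rest

-- phase 2: 'for j in range(bound-1, -1, -1): if numbers[j] != last: return j'
def pvBackScan (numbers : List Int) (last : Int) : List Int → Int
  | [] => -1
  | j :: rest =>
    if PySem.List.pyGetD numbers j 0 ≠ last then j
    else pvBackScan numbers last rest

def symmetric_elem_alt (numbers : List Int) (n : Int) : Int :=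
  if n ≤ 1 then -1
  else
    let last := PySem.List.pyGetD numbers (n - 1) 0
    let bound := pvFindBound numbers n last (PySem.List.pyRange 0 (n - 1) 1)
    pvBackScan numbers last (PySem.List.pyRange (bound - 1) (-1) (-1))

-- ===== PRECONDITION & SPEC =====
-- Pre_ excludes exactly the inputs with n ≥ 2 and n > len(numbers), on which A raises IndexError.
def Pre_symmetric_elem (numbers : List Int) (n : Int) : Prop :=
  n ≤ (numbers.length : Int) ∨ n ≤ 1
instance (numbers : List Int) (n : Int) : Decidable (Pre_symmetric_elem numbers n) := by
  unfold Pre_symmetric_elem; infer_instance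

def pvWitness_symmetric_elem : List Int × Int := ([1, 2, 1], 3)

def Spec_symmetric_elem (numbers : List Int) (n : Int) (out : Int) : Prop := out = symmetric_elem_alt numbers n
instance (numbers : List Int) (n : Int) (out : Int) : Decidable (Spec_symmetric_elem numbers n out) := by unfold Spec_symmetric_elem; infer_instance

-- ===== CLAIM (what is proved, stated in full; the proofs are below) =====
def Claim_equal_symmetric_elem : Prop := ∀ (numbers : List Int) (n : Int), Dom_symmetric_elem numbers n → Pre_symmetric_elem numbers n → Spec_symmetric_elem numbers n (symmetric_elem numbers n)

-- ===== LEMMAS AND PROOFS =====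

-- index bridge: an element of the slice numbers[k:n] is the corresponding element of numbers
theorem pv_slice_getD (numbers : List Int) (k n i : Int) (h0k : 0 ≤ k) (h0i : 0 ≤ i)
    (hi : i < n - k) (hnl : n ≤ (numbers.length : Int)) :
    PySem.List.pyGetD (PySem.List.slice numbers (some k) (some n)) i 0
      = PySem.List.pyGetD numbers (k + i) 0 := by
  rw [PySem.List.slice_toNat numbers h0k (by omega)]
  rw [PySem.List.pyGetD_eq_getElem _ _ h0i (by simp [List.length_take, List.length_drop]; omega),
      PySem.List.pyGetD_eq_getElem _ _ (by omega) (by omega)]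
  rw [List.getElem_take, List.getElem_drop]
  congr 1
  omega

theorem pv_slice_length (numbers : List Int) (k n : Int) (h0k : 0 ≤ k) (hkn : k ≤ n)
    (hnl : n ≤ (numbers.length : Int)) :
    ((PySem.List.slice numbers (some k) (some n)).length : Int) = n - k := by
  rw [PySem.List.slice_toNat numbers h0k (by omega)]
  simp [List.length_take, List.length_drop]
  omega

-- characterisation of the two-pointer check: mirror-sum form
theorem pvPal_iff (numbers : List Int) (lo hi : Int) :
    pvPal numbers lo hi = true ↔
      ∀ i : Int, lo ≤ i → 2 * i < hi + lo →
        PySem.List.pyGetD numbers i 0 = PySem.List.pyGetD numbers (hi + lo - i) 0 := by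
  fun_induction pvPal numbers lo hi with
  | case1 lo hi hlt hne =>
    constructor
    · intro h; exact absurd h (by simp)
    · intro h
      exact absurd (h lo le_rfl (by omega)) (by simpa using hne)
  | case2 lo hi hlt hne ih =>
    rw [ih]
    constructor
    · intro h i hle hlt2
      rcases eq_or_lt_of_le hle with heq2 | hgt
      · rw [← heq2, show hi + lo - lo = hi by omega]; simpa using hne
      · have := h i (by omega) (by omega)
        simpa [show hi - 1 + (lo + 1) - i = hi + lo - i by omega] using this
    · intro h i hle hlt2
      have := h i (by omega) (by omega)
      simpa [show hi - 1 + (lo + 1) - i = hi + lo - i by omega] using this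
  | case3 lo hi hge =>
    constructor
    · intro _ i h1 h2; omega
    · intro _; rfl

-- characterisation of A's is_symmetric loop
theorem pvIsSymLoop_iff (xs : List Int) (m : Nat) : ∀ k : Int, 0 ≤ k →
    ((xs.length : Int) - k).toNat = m →
    (pvIsSymLoop xs (PySem.List.pyRange k (xs.length : Int) 1) = true ↔
      ∀ i : Int, k ≤ i → i < (xs.length : Int) →
        PySem.List.pyGetD xs i 0 = PySem.List.pyGetD xs ((xs.length : Int) - 1 - i) 0) := by
  induction m with
  | zero =>
    intro k hk0 hm
    rw [PySem.List.pyRange_one_eq_nil (by omega)]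
    constructor
    · intro _ i h1 h2; omega
    · intro _; rfl
  | succ m ih =>
    intro k hk0 hm
    rw [PySem.List.pyRange_one_cons (by omega)]
    show (if PySem.List.pyGetD xs k 0 ≠ PySem.List.pyGetD xs ((xs.length : Int) - 1 - k) 0
      then false else pvIsSymLoop xs (PySem.List.pyRange (k+1) (xs.length : Int) 1)) = true ↔ _
    by_cases hne : PySem.List.pyGetD xs k 0 ≠ PySem.List.pyGetD xs ((xs.length : Int) - 1 - k) 0
    · rw [if_pos hne]
      constructor
      · intro h; exact absurd h (by simp)
      · intro h; exact absurd (h k le_rfl (by omega)) hne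
    · rw [if_neg hne]
      rw [ih (k+1) (by omega) (by omega)]
      push Not at hne
      constructor
      · intro h i h1 h2
        rcases eq_or_lt_of_le h1 with heq | hgt
        · rw [← heq]; exact hne
        · exact h i (by omega) h2
      · intro h i h1 h2; exact h i (by omega) h2

-- the two palindrome checks agree on the suffix numbers[k:n]
theorem pv_pal_eq (numbers : List Int) (k n : Int) (h0 : 0 ≤ k) (hkn : k < n)
    (hnl : n ≤ (numbers.length : Int)) :
    pvIsSymmetric (PySem.List.slice numbers (some k) (some n)) = pvPal numbers k (n - 1) := by
  have hlen : (((PySem.List.slice numbers (some k) (some n)).length : Nat) : Int) = n - k :=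
    pv_slice_length numbers k n h0 (by omega) hnl
  have h1 := pvIsSymLoop_iff (PySem.List.slice numbers (some k) (some n))
      ((PySem.List.slice numbers (some k) (some n)).length) 0 le_rfl (by omega)
  have h2 := pvPal_iff numbers k (n - 1)
  have hbridge : (∀ i : Int, 0 ≤ i → i < (((PySem.List.slice numbers (some k) (some n)).length : Nat) : Int) →
        PySem.List.pyGetD (PySem.List.slice numbers (some k) (some n)) i 0
          = PySem.List.pyGetD (PySem.List.slice numbers (some k) (some n))
              ((((PySem.List.slice numbers (some k) (some n)).length : Nat) : Int) - 1 - i) 0)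
      ↔ (∀ j : Int, k ≤ j → 2 * j < (n - 1) + k →
        PySem.List.pyGetD numbers j 0 = PySem.List.pyGetD numbers ((n - 1) + k - j) 0) := by
    constructor
    · intro h j hj1 hj2
      have hx := h (j - k) (by omega) (by omega)
      rw [hlen] at hx
      rw [pv_slice_getD numbers k n (j - k) h0 (by omega) (by omega) hnl,
          pv_slice_getD numbers k n (n - k - 1 - (j - k)) h0 (by omega) (by omega) hnl] at hx
      have e1 : k + (j - k) = j := by omega
      have e2 : k + (n - k - 1 - (j - k)) = n - 1 + k - j := by omega
      rw [e1, e2] at hx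
      exact hx
    · intro h i hi1 hi2
      rw [hlen] at hi2 ⊢
      rw [pv_slice_getD numbers k n i h0 hi1 (by omega) hnl,
          pv_slice_getD numbers k n (n - k - 1 - i) h0 (by omega) (by omega) hnl]
      set j := k + i with hj
      have e2 : k + (n - k - 1 - i) = n - 1 + k - j := by omega
      rw [e2]
      rcases lt_trichotomy (2 * j) (n - 1 + k) with hlt | heq | hgt
      · exact h j (by omega) hlt
      · have : n - 1 + k - j = j := by omega
        rw [this]
      · have hx := h (n - 1 + k - j) (by omega) (by omega)
        have e3 : n - 1 + k - (n - 1 + k - j) = j := by omega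
        rw [e3] at hx
        exact hx.symm
  rw [hlen] at h1 hbridge
  have hiff := h1.trans (hbridge.trans h2.symm)
  unfold pvIsSymmetric
  rw [hlen]
  cases hA : pvIsSymLoop (PySem.List.slice numbers (some k) (some n))
      (PySem.List.pyRange 0 (n - k) 1) <;>
    cases hB : pvPal numbers k (n - 1) <;>
      first
        | rfl
        | (exfalso; rw [hA, hB] at hiff; simp at hiff)

-- main invariant: A's loop from k with accumulator = B's backward scan below k
theorem pv_main (numbers : List Int) (n : Int) (_hn2 : 2 ≤ n) (hnl : n ≤ (numbers.length : Int))
    (m : Nat) : ∀ k : Int, 0 ≤ k → k ≤ n - 1 → (n - 1 - k).toNat = m →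
    pvALoop numbers n (PySem.List.pyRange k (n - 1) 1)
        (pvBackScan numbers (PySem.List.pyGetD numbers (n - 1) 0)
          (PySem.List.pyRange (k - 1) (-1) (-1)))
      = pvBackScan numbers (PySem.List.pyGetD numbers (n - 1) 0)
          (PySem.List.pyRange
            (pvFindBound numbers n (PySem.List.pyGetD numbers (n - 1) 0)
              (PySem.List.pyRange k (n - 1) 1) - 1) (-1) (-1)) := by
  induction m with
  | zero =>
    intro k hk0 hk1 hm
    have hk : k = n - 1 := by omega
    subst hk
    rw [PySem.List.pyRange_one_eq_nil le_rfl]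
    simp [pvALoop, pvFindBound]
  | succ m ih =>
    intro k hk0 hk1 hm
    rw [PySem.List.pyRange_one_cons (show k < n - 1 by omega)]
    by_cases hne : PySem.List.pyGetD numbers k 0 ≠ PySem.List.pyGetD numbers (n - 1) 0
    · have hbeq : (PySem.List.pyGetD numbers k 0 == PySem.List.pyGetD numbers (n - 1) 0) = false := by
        simpa using hne
      have hk : pvBackScan numbers (PySem.List.pyGetD numbers (n - 1) 0)
          (PySem.List.pyRange k (-1) (-1)) = k := by
        rw [PySem.List.pyRange_neg_one_cons (show (-1 : Int) < k by omega)]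
        simp [pvBackScan, hne]
      have IH := ih (k + 1) (by omega) (by omega) (by omega)
      simp only [show (k : Int) + 1 - 1 = k from by omega] at IH
      rw [hk] at IH
      have hfb : pvFindBound numbers n (PySem.List.pyGetD numbers (n - 1) 0)
          (k :: PySem.List.pyRange (k + 1) (n - 1) 1)
          = pvFindBound numbers n (PySem.List.pyGetD numbers (n - 1) 0)
              (PySem.List.pyRange (k + 1) (n - 1) 1) := by
        simp [pvFindBound, hbeq]
      simp only [pvALoop]
      rw [if_pos hne, hfb]
      exact IH
    · push Not at hne
      have hbeq : (PySem.List.pyGetD numbers k 0 == PySem.List.pyGetD numbers (n - 1) 0) = true := by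
        simpa using hne
      have hpe := pv_pal_eq numbers k n hk0 (by omega) hnl
      by_cases hpal : pvPal numbers k (n - 1) = true
      · have hfb : pvFindBound numbers n (PySem.List.pyGetD numbers (n - 1) 0)
            (k :: PySem.List.pyRange (k + 1) (n - 1) 1) = k := by
          simp [pvFindBound, hbeq, hpal]
        simp only [pvALoop]
        rw [if_neg (not_not_intro hne), hpe, if_pos hpal, hfb]
      · have hpal' : pvPal numbers k (n - 1) = false := by simpa using hpal
        have hk : pvBackScan numbers (PySem.List.pyGetD numbers (n - 1) 0)
            (PySem.List.pyRange k (-1) (-1))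
            = pvBackScan numbers (PySem.List.pyGetD numbers (n - 1) 0)
                (PySem.List.pyRange (k - 1) (-1) (-1)) := by
          rw [PySem.List.pyRange_neg_one_cons (show (-1 : Int) < k by omega)]
          simp [pvBackScan, hne]
        have IH := ih (k + 1) (by omega) (by omega) (by omega)
        simp only [show (k : Int) + 1 - 1 = k from by omega] at IH
        rw [hk] at IH
        have hfb : pvFindBound numbers n (PySem.List.pyGetD numbers (n - 1) 0)
            (k :: PySem.List.pyRange (k + 1) (n - 1) 1)
            = pvFindBound numbers n (PySem.List.pyGetD numbers (n - 1) 0)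
                (PySem.List.pyRange (k + 1) (n - 1) 1) := by
          simp [pvFindBound, hpal']
        simp only [pvALoop]
        rw [if_neg (not_not_intro hne), hpe, if_neg (by simp [hpal']), hfb]
        exact IH

-- ===== VERDICT (by name: the statement is the Claim_ definition above) =====
theorem symmetric_elem_spec : Claim_equal_symmetric_elem := by
  intro numbers n _ hpre
  unfold Spec_symmetric_elem symmetric_elem symmetric_elem_alt
  by_cases hn : n ≤ 1
  · rw [if_pos hn, PySem.List.pyRange_one_eq_nil (by omega)]
    rfl
  · rw [if_neg hn]
    have hnl : n ≤ (numbers.length : Int) := by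
      rcases hpre with h | h
      · exact h
      · omega
    have := pv_main numbers n (by omega) hnl (n - 1 - 0).toNat 0 (by omega) (by omega) rfl
    simpa [PySem.List.pyRange_neg_one_eq_nil, pvBackScan] using this
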